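-- pv_equiv track=rewrite | github.com/Kzefnde/audio-to-text | app.py | format_terms
-- ===== SOURCE A (Python) =====
-- def format_terms(terms):
--     """Форматирует и сортирует термины"""
--     # Сортируем термины по алфавиту
--     terms = sorted(terms, key=lambda x: x[0].lower())
--
--     # Группируем термины по первой букве
--     grouped_terms = {}
--     for term, definition in terms:
--         first_letter = term[0].upper()
--         if first_letter not in grouped_terms:
--             grouped_terms[first_letter] = []
--         grouped_terms[first_letter].append((term, definition))
--
--     # Форматируем результат
--     formatted_terms = []
--     for letter in sorted(grouped_terms.keys()):
--         for term, definition in grouped_terms[letter]: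
--             formatted_terms.append((term, definition))
--
--     return formatted_terms
-- ===== SOURCE B (Python) =====
-- def format_terms(terms):
--     """Single stable sort with a composite key: (first letter uppercased, whole term lowercased)."""
--     return [(term, definition)
--             for term, definition in sorted(terms, key=lambda x: (x[0][0].upper(), x[0].lower()))]
-- ===== Notes on version B (the rewrite author's own statement) =====
-- stated objective: simpler
-- what changed: Replaced A's four-stage pipeline (sort by lowercased term, group into a dict keyed by uppercased first letter, sort the keys, re-concatenate the groups) by one stable sort with the composite key (term[0].upper(), term.lower()), whose primary component reproduces the group ordering and whose secondary component reproduces the intra-group ordering.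
import Mathlib
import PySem

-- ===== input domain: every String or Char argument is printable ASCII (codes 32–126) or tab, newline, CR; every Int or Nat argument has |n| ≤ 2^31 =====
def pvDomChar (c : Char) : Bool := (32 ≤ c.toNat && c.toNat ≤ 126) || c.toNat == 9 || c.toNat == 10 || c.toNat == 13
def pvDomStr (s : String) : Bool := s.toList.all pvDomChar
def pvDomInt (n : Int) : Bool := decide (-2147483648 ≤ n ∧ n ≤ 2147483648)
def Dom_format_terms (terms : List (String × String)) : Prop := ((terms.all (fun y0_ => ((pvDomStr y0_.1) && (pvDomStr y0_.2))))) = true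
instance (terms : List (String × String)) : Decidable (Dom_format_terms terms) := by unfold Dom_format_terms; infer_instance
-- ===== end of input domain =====

-- B replaces A's sort→group-by-first-letter-dict→sort-keys→concatenate pipeline by a single stable
-- sort on the composite key (first letter uppercased, term lowercased): simpler, same O(n log n) cost.


-- ===== PORT A =====
-- term[0].upper() : first character of the term, uppercased (the `getD ' '` default is never
-- reached on Pre_, which excludes empty terms — Python raises IndexError there).
def pvFirstUpper (s : String) : Char :=
  PySem.Chars.upperChar ((PySem.Str.pyGet? s 0).getD ' ')

def format_terms (terms : List (String × String)) : List (String × String) :=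
  -- terms = sorted(terms, key=lambda x: x[0].lower())
  let sortedTerms := PySem.List.sorted terms (fun x => PySem.Str.lower x.1) false
  -- grouped_terms = {}; for term, definition in terms: …
  let grouped : PySem.Dict Char (List (String × String)) :=
    sortedTerms.foldl (fun d p =>
      let firstLetter := pvFirstUpper p.1
      -- if first_letter not in grouped_terms: grouped_terms[first_letter] = []
      let d := if d.contains firstLetter then d else d.insert firstLetter []
      -- grouped_terms[first_letter].append((term, definition))
      d.modify firstLetter [] (fun l => l ++ [p])) PySem.Dict.empty
  -- for letter in sorted(grouped_terms.keys()): for term, definition in grouped_terms[letter]: append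
  let letters := PySem.List.sorted grouped.keys (fun k => k) false
  letters.foldl (fun acc letter =>
    (grouped.getD letter []).foldl (fun acc p => acc ++ [p]) acc) []

-- ===== PORT B =====
def format_terms_alt (terms : List (String × String)) : List (String × String) :=
  -- [(term, definition) for term, definition in sorted(terms, key=lambda x: (x[0][0].upper(), x[0].lower()))]
  (PySem.List.sorted2 terms (fun x => pvFirstUpper x.1) (fun x => PySem.Str.lower x.1) false).map
    (fun p => (p.1, p.2))

-- ===== PRECONDITION & SPEC =====
-- Pre_ excludes lists containing a term whose name is the empty string: there Python A (and B)
-- raises IndexError on term[0].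
def Pre_format_terms (terms : List (String × String)) : Prop := ∀ p ∈ terms, p.1 ≠ ""
instance (terms : List (String × String)) : Decidable (Pre_format_terms terms) := by unfold Pre_format_terms; infer_instance
def pvWitness_format_terms : (List (String × String)) := [("beta", "b"), ("Alpha", "a"), ("apple", "c")]

def Spec_format_terms (terms : List (String × String)) (out : List (String × String)) : Prop := out = format_terms_alt terms
instance (terms : List (String × String)) (out : List (String × String)) : Decidable (Spec_format_terms terms out) := by unfold Spec_format_terms; infer_instance

-- ===== CLAIM (what is proved, stated in full; the proofs are below) =====
def Claim_equal_format_terms : Prop := ∀ (terms : List (String × String)), Dom_format_terms terms → Pre_format_terms terms → Spec_format_terms terms (format_terms terms)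

-- ===== LEMMAS AND PROOFS =====

-- The equality of the two ports in fact holds for arbitrary key functions K1 (primary, A's group
-- letter) and K2 (secondary, A's sort key); all lemmas below are stated generically.

-- lexB is exactly the comparison sorted2 uses for reverse = false.
def lexB {α κ₁ κ₂ : Type} [LinearOrder κ₁] [LinearOrder κ₂] (K1 : α → κ₁) (K2 : α → κ₂) : α → α → Bool :=
  fun a b => decide (K1 a < K1 b) || (!decide (K1 b < K1 a) && decide (K2 a < K2 b))

theorem insertBy_nil {α : Type} (b : α → α → Bool) (x : α) :
    PySem.List.insertBy b x [] = [x] := rfl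

theorem insertBy_cons {α : Type} (b : α → α → Bool) (x y : α) (ys : List α) :
    PySem.List.insertBy b x (y :: ys) =
      if b x y then x :: y :: ys else y :: PySem.List.insertBy b x ys := rfl

theorem insertBy_perm {α : Type} (b : α → α → Bool) (x : α) (s : List α) :
    (PySem.List.insertBy b x s).Perm (x :: s) := by
  induction s with
  | nil => simp [insertBy_nil]
  | cons y ys ih =>
    rw [insertBy_cons]
    split_ifs
    · exact .refl _
    · exact (ih.cons y).trans (List.Perm.swap x y ys)

theorem insertBy_of_forall_before {α : Type} (b : α → α → Bool) (x : α) (s : List α)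
    (h : ∀ y ∈ s, b x y = true) : PySem.List.insertBy b x s = x :: s := by
  cases s with
  | nil => rfl
  | cons y ys => rw [insertBy_cons, h y (by simp)]; rfl

theorem insertBy_append_left {α : Type} (b : α → α → Bool) (x : α) (A Z : List α)
    (h : ∀ y ∈ A, b x y = false) :
    PySem.List.insertBy b x (A ++ Z) = A ++ PySem.List.insertBy b x Z := by
  induction A with
  | nil => simp
  | cons a A' ih =>
    rw [List.cons_append, insertBy_cons, h a (by simp)]
    simp only [Bool.false_eq_true, if_false, List.cons_append, List.cons.injEq, true_and]
    exact ih (fun y hy => h y (by simp [hy]))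

theorem insertBy_sandwich {α : Type} (b b' : α → α → Bool) (x : α) (B R : List α)
    (hB : ∀ e ∈ B, b x e = b' x e) (hR : ∀ e ∈ R, b x e = true) :
    PySem.List.insertBy b x (B ++ R) = PySem.List.insertBy b' x B ++ R := by
  induction B with
  | nil => simpa [insertBy_nil] using insertBy_of_forall_before b x R hR
  | cons e B' ih =>
    rw [List.cons_append, insertBy_cons, insertBy_cons, hB e (by simp)]
    split_ifs
    · simp
    · simp only [List.cons_append, List.cons.injEq, true_and]
      exact ih (fun y hy => hB y (by simp [hy]))

-- Filtering commutes with inserting into a K2-sorted list.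
theorem filter_insertBy {α κ₂ : Type} [LinearOrder κ₂] (K2 : α → κ₂) (x : α) (s : List α)
    (hs : s.Pairwise (fun a b => K2 a ≤ K2 b)) (q : α → Bool) :
    (PySem.List.insertBy (fun a b => decide (K2 a < K2 b)) x s).filter q =
      if q x then PySem.List.insertBy (fun a b => decide (K2 a < K2 b)) x (s.filter q)
      else s.filter q := by
  induction s with
  | nil => by_cases hq : q x <;> simp [insertBy_nil, List.filter, hq]
  | cons e s' ih =>
    have h₁ : ∀ f ∈ s', K2 e ≤ K2 f := (List.pairwise_cons.mp hs).1
    have hs' : s'.Pairwise (fun a b => K2 a ≤ K2 b) := (List.pairwise_cons.mp hs).2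
    rw [insertBy_cons]
    by_cases hxe : K2 x < K2 e
    · simp only [hxe, decide_true, if_true]
      by_cases hq : q x
      · have hall : ∀ f ∈ (e :: s').filter q,
            (fun a b => decide (K2 a < K2 b)) x f = true := by
          intro f hf
          have hf' : f ∈ e :: s' := List.mem_of_mem_filter hf
          rcases List.mem_cons.mp hf' with rfl | hmem
          · simpa using hxe
          · simpa using lt_of_lt_of_le hxe (h₁ f hmem)
        rw [insertBy_of_forall_before _ _ _ hall]
        simp [List.filter, hq]
      · simp [List.filter, hq]
    · simp only [hxe, decide_false, Bool.false_eq_true, if_false]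
      by_cases hq : q x <;> by_cases hqe : q e <;>
        simp [hqe, ih hs', hq, insertBy_cons, hxe]

-- Inserting x into concatenated buckets when its letter is already one of the (strictly
-- increasing) bucket letters.
theorem insert_flatMap_mem {α κ₁ κ₂ : Type} [LinearOrder κ₁] [LinearOrder κ₂]
    (K1 : α → κ₁) (K2 : α → κ₂) (letters : List κ₁) (bucket : κ₁ → List α) (x : α)
    (hlt : letters.Pairwise (· < ·))
    (hK : ∀ k ∈ letters, ∀ p ∈ bucket k, K1 p = k)
    (hmem : K1 x ∈ letters) :
    PySem.List.insertBy (lexB K1 K2) x (letters.flatMap bucket) =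
      letters.flatMap (fun k =>
        if k = K1 x then PySem.List.insertBy (fun a b => decide (K2 a < K2 b)) x (bucket k)
        else bucket k) := by
  induction letters with
  | nil => simp at hmem
  | cons c rest ih =>
    have hcr : ∀ k ∈ rest, c < k := (List.pairwise_cons.mp hlt).1
    have hltr : rest.Pairwise (· < ·) := (List.pairwise_cons.mp hlt).2
    by_cases hc : c = K1 x
    · have hrest : rest.flatMap (fun k =>
          if k = K1 x then PySem.List.insertBy (fun a b => decide (K2 a < K2 b)) x (bucket k)
          else bucket k) = rest.flatMap bucket := by
        apply List.flatMap_congr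
        intro k hk
        have : k ≠ K1 x := ne_of_gt (hc ▸ hcr k hk)
        simp [this]
      rw [List.flatMap_cons, List.flatMap_cons, if_pos hc, hrest]
      apply insertBy_sandwich
      · intro e he
        have : K1 e = K1 x := (hK c (by simp) e he).trans hc
        simp [lexB, this]
      · intro e he
        rcases List.mem_flatMap.mp he with ⟨k, hk, hek⟩
        have hKe : K1 e = k := hK k (by simp [hk]) e hek
        have : K1 x < K1 e := by rw [hKe, ← hc]; exact hcr k hk
        simp [lexB, this]
    · have hmemr : K1 x ∈ rest := by
        rcases List.mem_cons.mp hmem with h | h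
        · exact absurd h.symm hc
        · exact h
      have hclt : c < K1 x := hcr _ hmemr
      rw [List.flatMap_cons, List.flatMap_cons, if_neg (fun h => hc h)]
      rw [insertBy_append_left]
      · rw [ih hltr (fun k hk => hK k (by simp [hk])) hmemr]
      · intro y hy
        have hKy : K1 y = c := hK c (by simp) y hy
        simp only [lexB, hKy]
        rw [decide_eq_false (not_lt_of_gt hclt), decide_eq_true hclt]
        simp

-- Inserting x into concatenated buckets when its letter is new.
theorem insert_flatMap_not_mem {α κ₁ κ₂ : Type} [LinearOrder κ₁] [LinearOrder κ₂]
    (K1 : α → κ₁) (K2 : α → κ₂) (letters : List κ₁) (bucket : κ₁ → List α) (x : α)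
    (hlt : letters.Pairwise (· < ·))
    (hK : ∀ k ∈ letters, ∀ p ∈ bucket k, K1 p = k)
    (hmem : K1 x ∉ letters) :
    PySem.List.insertBy (lexB K1 K2) x (letters.flatMap bucket) =
      (PySem.List.insertBy (fun a b => decide (a < b)) (K1 x) letters).flatMap
        (fun k => if k = K1 x then [x] else bucket k) := by
  induction letters with
  | nil => simp [insertBy_nil]
  | cons c rest ih =>
    have hcr : ∀ k ∈ rest, c < k := (List.pairwise_cons.mp hlt).1
    have hltr : rest.Pairwise (· < ·) := (List.pairwise_cons.mp hlt).2
    have hne : K1 x ≠ c := fun h => hmem (by simp [h])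
    have hmemr : K1 x ∉ rest := fun h => hmem (by simp [h])
    by_cases hlt1 : K1 x < c
    · have hstep : PySem.List.insertBy (fun a b => decide (a < b)) (K1 x) (c :: rest) =
          K1 x :: c :: rest := by
        rw [insertBy_cons]; simp [hlt1]
      have hall : ∀ y ∈ (c :: rest).flatMap bucket, lexB K1 K2 x y = true := by
        intro y hy
        rcases List.mem_flatMap.mp hy with ⟨k, hk, hyk⟩
        have hKy : K1 y = k := hK k hk y hyk
        have : K1 x < K1 y := by
          rw [hKy]
          rcases List.mem_cons.mp hk with rfl | hk'
          · exact hlt1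
          · exact hlt1.trans (hcr k hk')
        simp [lexB, this]
      have hifs : ∀ k ∈ c :: rest, (if k = K1 x then [x] else bucket k) = bucket k := by
        intro k hk
        have : k ≠ K1 x := by
          rcases List.mem_cons.mp hk with rfl | hk'
          · exact fun h => hne h.symm
          · exact ne_of_gt (hlt1.trans (hcr k hk'))
        simp [this]
      rw [hstep, insertBy_of_forall_before _ _ _ hall]
      simp only [List.flatMap_cons]
      rw [if_neg (Ne.symm hne),
        List.flatMap_congr (fun k hk => hifs k (List.mem_cons_of_mem c hk))]
      simp
    · have hclt : c < K1 x := lt_of_le_of_ne (not_lt.mp hlt1) (fun h => hne h.symm)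
      rw [insertBy_cons]
      simp only [hlt1, decide_false, Bool.false_eq_true, if_false]
      rw [List.flatMap_cons, List.flatMap_cons, if_neg (fun h => hne h.symm)]
      rw [insertBy_append_left]
      · rw [ih hltr (fun k hk => hK k (by simp [hk])) hmemr]
      · intro y hy
        have hKy : K1 y = c := hK c (by simp) y hy
        simp only [lexB, hKy]
        rw [decide_eq_false (not_lt_of_gt hclt), decide_eq_true hclt]
        simp

-- A's result, as a function of the K2-sorted list s: concatenation, over the sorted distinct
-- letters of s, of the buckets of s.
def bucketed {α κ₁ : Type} [LinearOrder κ₁] [BEq κ₁] (K1 : α → κ₁) (s : List α) : List α :=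
  (PySem.List.sorted (PySem.Set.ofList (s.map K1)) (fun k => k) false).flatMap
    (fun k => s.filter (fun p => K1 p == k))

theorem sorted_append_singleton {α κ : Type} [LT κ] [DecidableLT κ] (l : List α) (y : α) (key : α → κ) :
    PySem.List.sorted (l ++ [y]) key false =
      PySem.List.insertBy (fun a b => decide (key a < key b)) y (PySem.List.sorted l key false) := by
  simp [PySem.List.sorted, List.foldl_append]

theorem sorted2_append_singleton {α κ₁ κ₂ : Type} [LinearOrder κ₁] [LinearOrder κ₂]
    (l : List α) (y : α) (k1 : α → κ₁) (k2 : α → κ₂) :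
    PySem.List.sorted2 (l ++ [y]) k1 k2 false =
      PySem.List.insertBy (lexB k1 k2) y (PySem.List.sorted2 l k1 k2 false) := by
  unfold PySem.List.sorted2
  rw [List.foldl_append]
  rfl

theorem set_ofList_perm {κ : Type} [BEq κ] [LawfulBEq κ] (l₁ l₂ : List κ) (h : l₁.Perm l₂) :
    (PySem.Set.ofList l₁).Perm (PySem.Set.ofList l₂) := by
  rw [List.perm_ext_iff_of_nodup (PySem.Set.nodup_ofList l₁) (PySem.Set.nodup_ofList l₂)]
  intro a
  rw [PySem.Set.mem_ofList, PySem.Set.mem_ofList]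
  exact ⟨fun ha => h.mem_iff.mp ha, fun ha => h.mem_iff.mpr ha⟩

theorem set_ofList_append_singleton {κ : Type} [BEq κ] (l : List κ) (a : κ) :
    PySem.Set.ofList (l ++ [a]) = (PySem.Set.ofList l).add a := by
  rw [PySem.Set.ofList_eq_foldl, PySem.Set.ofList_eq_foldl, List.foldl_append]
  rfl

-- Core step: inserting one element by K2 into a K2-sorted list commutes with bucketing,
-- matching one lexicographic insertion on the bucketed list.
theorem bucketed_insert {α κ₁ κ₂ : Type} [LinearOrder κ₁] [BEq κ₁] [LawfulBEq κ₁] [LinearOrder κ₂]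
    (K1 : α → κ₁) (K2 : α → κ₂) (x : α) (s : List α)
    (hs : s.Pairwise (fun a b => K2 a ≤ K2 b)) :
    bucketed K1 (PySem.List.insertBy (fun a b => decide (K2 a < K2 b)) x s) =
      PySem.List.insertBy (lexB K1 K2) x (bucketed K1 s) := by
  have hperm : ((PySem.List.insertBy (fun a b => decide (K2 a < K2 b)) x s).map K1).Perm
      (s.map K1 ++ [K1 x]) :=
    ((insertBy_perm _ x s).map K1).trans (List.perm_append_singleton (K1 x) (s.map K1)).symm
  have hlset : PySem.List.sorted
      (PySem.Set.ofList ((PySem.List.insertBy (fun a b => decide (K2 a < K2 b)) x s).map K1))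
      (fun k => k) false =
      PySem.List.sorted (PySem.Set.ofList (s.map K1 ++ [K1 x])) (fun k => k) false :=
    PySem.List.sorted_eq_sorted_of_perm _ _ _ (fun _ _ h => h) (set_ofList_perm _ _ hperm)
  have hKbuck : ∀ k ∈ PySem.List.sorted (PySem.Set.ofList (s.map K1)) (fun k => k) false,
      ∀ p ∈ s.filter (fun p => K1 p == k), K1 p = k := by
    intro k _ p hp
    simpa using List.of_mem_filter hp
  have hfilter : ∀ k, (PySem.List.insertBy (fun a b => decide (K2 a < K2 b)) x s).filter
      (fun p => K1 p == k) =
      if K1 x = k then PySem.List.insertBy (fun a b => decide (K2 a < K2 b)) x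
        (s.filter (fun p => K1 p == k))
      else s.filter (fun p => K1 p == k) := by
    intro k
    rw [filter_insertBy K2 x s hs (fun p => K1 p == k)]
    by_cases h : K1 x = k <;> simp [h]
  by_cases hmem : K1 x ∈ s.map K1
  · have hset : PySem.Set.ofList (s.map K1 ++ [K1 x]) = PySem.Set.ofList (s.map K1) := by
      rw [set_ofList_append_singleton]
      exact PySem.Set.add_of_mem (by rw [PySem.Set.mem_ofList]; exact hmem)
    have hmeml : K1 x ∈ PySem.List.sorted (PySem.Set.ofList (s.map K1)) (fun k => k) false := by
      rw [PySem.List.mem_sorted, PySem.Set.mem_ofList]; exact hmem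
    unfold bucketed
    rw [hlset, hset]
    rw [insert_flatMap_mem K1 K2 _ _ x (PySem.List.sorted_ofList_pairwise_lt _) hKbuck hmeml]
    apply List.flatMap_congr
    intro k hk
    rw [hfilter k]
    rcases eq_or_ne (K1 x) k with h | h
    · rw [if_pos h, if_pos h.symm]
    · rw [if_neg h, if_neg (Ne.symm h)]
  · have hset : PySem.Set.ofList (s.map K1 ++ [K1 x]) = PySem.Set.ofList (s.map K1) ++ [K1 x] := by
      rw [set_ofList_append_singleton]
      exact PySem.Set.add_of_not_mem (by rw [PySem.Set.mem_ofList]; exact hmem)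
    have hmeml : K1 x ∉ PySem.List.sorted (PySem.Set.ofList (s.map K1)) (fun k => k) false := by
      rw [PySem.List.mem_sorted, PySem.Set.mem_ofList]; exact hmem
    have hempty : s.filter (fun p => K1 p == K1 x) = [] := by
      rw [List.filter_eq_nil_iff]
      intro p hp
      simp only [beq_iff_eq]
      intro h
      exact hmem (h ▸ List.mem_map_of_mem hp)
    unfold bucketed
    rw [hlset, hset, sorted_append_singleton]
    rw [insert_flatMap_not_mem K1 K2 _ _ x (PySem.List.sorted_ofList_pairwise_lt _) hKbuck hmeml]
    apply List.flatMap_congr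
    intro k hk
    rw [hfilter k]
    rcases eq_or_ne (K1 x) k with h | h
    · rw [if_pos h]
      subst h
      rw [hempty, insertBy_nil, if_pos rfl]
    · rw [if_neg h, if_neg (Ne.symm h)]

-- A's whole pipeline equals B's single composite-key sort.
theorem bucketed_sorted_eq_sorted2 {α κ₁ κ₂ : Type} [LinearOrder κ₁] [BEq κ₁] [LawfulBEq κ₁]
    [LinearOrder κ₂] (K1 : α → κ₁) (K2 : α → κ₂) (xs : List α) :
    bucketed K1 (PySem.List.sorted xs K2 false) = PySem.List.sorted2 xs K1 K2 false := by
  induction xs using List.reverseRecOn with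
  | nil => rfl
  | append_singleton l y ih =>
    rw [sorted_append_singleton, sorted2_append_singleton,
      bucketed_insert K1 K2 y _ (PySem.List.sorted_pairwise l K2), ih]

-- The dict-building step of A's loop is a single `modify`.
theorem dict_step {κ : Type} [BEq κ] [LawfulBEq κ] (d : PySem.Dict κ (List (String × String)))
    (k : κ) (f : List (String × String) → List (String × String)) :
    (if d.contains k then d else d.insert k []).modify k [] f = d.modify k [] f := by
  by_cases h : d.contains k
  · simp [h]
  · simp only [h, Bool.false_eq_true, if_false]
    show (d.insert k []).insert k (f ((d.insert k []).getD k [])) = d.insert k (f (d.getD k []))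
    rw [PySem.Dict.getD_insert_self, PySem.Dict.insert_insert_self,
      PySem.Dict.getD_of_not_contains d [] (by simpa using h)]

-- A's result in bucketed form.
theorem format_terms_eq_bucketed (terms : List (String × String)) :
    format_terms terms =
      bucketed (fun p => pvFirstUpper p.1)
        (PySem.List.sorted terms (fun x => PySem.Str.lower x.1) false) := by
  unfold format_terms
  set s := PySem.List.sorted terms (fun x => PySem.Str.lower x.1) false with hsdef
  have hfold : s.foldl (fun d p =>
      let firstLetter := pvFirstUpper p.1
      let d' := if d.contains firstLetter then d else d.insert firstLetter []
      d'.modify firstLetter [] (fun l => l ++ [p])) PySem.Dict.empty =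
      s.foldl (fun d p => d.modify (pvFirstUpper p.1) [] (fun l => l ++ [p])) PySem.Dict.empty := by
    apply PySem.List.foldl_congr_mem
    intro d p _
    exact dict_step d (pvFirstUpper p.1) (fun l => l ++ [p])
  simp only [hfold]
  set g := s.foldl (fun d p => d.modify (pvFirstUpper p.1) [] (fun l => l ++ [p]))
    PySem.Dict.empty with hgdef
  have hkeys : g.keys = PySem.Set.ofList (s.map (fun p => pvFirstUpper p.1)) := by
    rw [hgdef, PySem.Dict.keys_foldl_modify_key s (fun p => pvFirstUpper p.1) []
      (fun _ p l => l ++ [p]) PySem.Dict.empty, PySem.Dict.keys_empty]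
    rw [PySem.Set.ofList_eq_foldl]
    rfl
  have hgetD : ∀ c, g.getD c [] = s.filter (fun p => pvFirstUpper p.1 == c) := by
    intro c
    have hmapped : g = (s.map (fun p => (pvFirstUpper p.1, p))).foldl
        (fun d q => d.modify q.1 [] (fun l => l ++ [q.2])) PySem.Dict.empty := by
      rw [hgdef, List.foldl_map]
    rw [hmapped, PySem.Dict.getD_foldl_modify_append]
    rw [List.filter_map]
    simp only [List.map_map, PySem.Dict.getD_empty, List.nil_append]
    have : ((fun x => x.2) ∘ fun p : String × String => (pvFirstUpper p.1, p)) = id := rfl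
    rw [this, List.map_id]
    rfl
  have hout : ∀ (letters : List Char),
      letters.foldl (fun acc letter =>
        (g.getD letter []).foldl (fun acc p => acc ++ [p]) acc) [] =
      letters.flatMap (fun letter => g.getD letter []) := by
    intro letters
    have : ∀ (acc : List (String × String)), ∀ letter ∈ letters,
        (g.getD letter []).foldl (fun acc p => acc ++ [p]) acc = acc ++ g.getD letter [] := by
      intro acc letter _
      exact PySem.List.foldl_append_singleton _ acc
    have h1 := PySem.List.foldl_congr_mem letters
      (fun acc letter => (g.getD letter []).foldl (fun acc p => acc ++ [p]) acc)
      (fun acc letter => acc ++ g.getD letter [])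
      ([] : List (String × String))
      (fun acc x _ => PySem.List.foldl_append_singleton (g.getD x []) acc)
    rw [h1]
    simpa using PySem.List.foldl_append_eq_flatMap (fun letter => g.getD letter []) letters []
  rw [hout, hkeys]
  unfold bucketed
  apply List.flatMap_congr
  intro k _
  exact hgetD k

theorem map_pair_eta (l : List (String × String)) :
    l.map (fun p => (p.1, p.2)) = l := by
  simp

-- ===== VERDICT (by name: the statement is the Claim_ definition above) =====
theorem format_terms_spec : Claim_equal_format_terms := by
  intro terms _ _
  unfold Spec_format_terms format_terms_alt
  rw [map_pair_eta, format_terms_eq_bucketed,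
    bucketed_sorted_eq_sorted2 (fun p => pvFirstUpper p.1) (fun x => PySem.Str.lower x.1) terms]
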